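-- pv_equiv track=rewrite | github.com/iqbalhossan99/python-and-oop | week-01/ml-4-ass-01/max-split.py | MaxSplit
-- ===== SOURCE A (Python) =====
-- def MaxSplit(s):
--     n = len(s)
--     splitResult = []
--     count = 0
--     tempString = ""
--
--     for i in range(n):
--         tempString += s[i]
--
--         if s[i] == 'L':
--             count += 1
--         else:
--             count -= 1
--
--         if count == 0:
--             splitResult.append(tempString)
--             tempString = ""
--
--     return splitResult
-- ===== SOURCE B (Python) =====
-- def MaxSplit(s):
--     # Phase 1: running-balance table over the whole string.
--     bal = []
--     c = 0
--     for ch in s: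
--         c += 1 if ch == 'L' else -1
--         bal.append(c)
--     # Phase 2: cut at every zero of the table and slice the original string.
--     res = []
--     start = 0
--     for i, b in enumerate(bal):
--         if b == 0:
--             res.append(s[start:i + 1])
--             start = i + 1
--     return res
-- ===== Notes on version B (the rewrite author's own statement) =====
-- stated objective: alternative
-- what changed: Instead of one loop that accumulates a temp string character by character and appends it when the running count hits zero, B builds the full prefix-balance table in one pass and then, in a separate pass over that table, slices segments out of the original string in bulk between consecutive zero-balance positions.
import Mathlib
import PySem

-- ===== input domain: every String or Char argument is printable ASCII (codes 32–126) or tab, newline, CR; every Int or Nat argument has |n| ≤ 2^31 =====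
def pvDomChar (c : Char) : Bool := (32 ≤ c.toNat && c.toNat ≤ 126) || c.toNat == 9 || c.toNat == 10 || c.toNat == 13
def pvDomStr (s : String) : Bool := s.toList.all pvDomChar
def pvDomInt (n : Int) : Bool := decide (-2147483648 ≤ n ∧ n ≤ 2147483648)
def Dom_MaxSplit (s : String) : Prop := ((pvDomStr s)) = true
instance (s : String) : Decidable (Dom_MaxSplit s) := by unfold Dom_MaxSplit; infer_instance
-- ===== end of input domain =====

-- B replaces A's single accumulate-and-cut loop by two phases: build the prefix-balance
-- table, then slice the string between consecutive zero-balance positions (alternative decomposition).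


-- ===== PORT A =====
-- A's loop body: temp string grows char by char (kept as List Char, turned into a
-- String exactly when appended to the result), count updated, cut when count = 0.
def stepA (st : List String × Int × List Char) (c : Char) : List String × Int × List Char :=
  let temp := st.2.2 ++ [c]
  let count := if c = 'L' then st.2.1 + 1 else st.2.1 - 1
  if count = 0 then (st.1 ++ [String.mk temp], count, []) else (st.1, count, temp)

-- 'for i in range(n): … s[i] …' visits exactly the characters of s in order.
def MaxSplit (s : String) : List String :=
  (s.toList.foldl stepA ([], 0, [])).1

-- ===== PORT B =====
-- phase 1 step: extend the balance table by the next running balance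
def stepB1 (st : List Int × Int) (ch : Char) : List Int × Int :=
  let c := st.2 + (if ch = 'L' then 1 else -1)
  (st.1 ++ [c], c)

-- phase 2 step: at a zero of the table, slice s[start:i+1] and move start
def stepB2 (cs : List Char) (st : List String × Int) (p : Int × Int) : List String × Int :=
  if p.2 = 0 then
    (st.1 ++ [String.mk (PySem.List.slice cs (some st.2) (some (p.1 + 1)))], p.1 + 1)
  else st

def MaxSplit_alt (s : String) : List String :=
  let cs := s.toList
  let bal := (cs.foldl stepB1 ([], 0)).1
  ((PySem.List.enumerate bal).foldl (stepB2 cs) ([], 0)).1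

-- ===== PRECONDITION & SPEC =====
def Spec_MaxSplit (s : String) (out : List String) : Prop := out = MaxSplit_alt s
instance (s : String) (out : List String) : Decidable (Spec_MaxSplit s out) := by unfold Spec_MaxSplit; infer_instance

-- ===== CLAIM (what is proved, stated in full; the proofs are below) =====
def Claim_equal_MaxSplit : Prop := ∀ (s : String), Dom_MaxSplit s → Spec_MaxSplit s (MaxSplit s)

-- ===== LEMMAS AND PROOFS =====

def delta (c : Char) : Int := if c = 'L' then 1 else -1

def balOf (temp : List Char) : Int := (temp.map delta).sum

def prefixBal (k : Int) : List Char → List Int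
  | [] => []
  | c :: cs => (k + delta c) :: prefixBal (k + delta c) cs

lemma balFold (cs : List Char) : ∀ (acc : List Int) (k : Int),
    (cs.foldl stepB1 (acc, k)).1 = acc ++ prefixBal k cs := by
  induction cs with
  | nil => intro acc k; simp [prefixBal]
  | cons c cs ih =>
    intro acc k
    simp only [List.foldl_cons, stepB1, prefixBal, delta]
    rw [ih]
    simp

lemma key : ∀ (cs full pre temp : List Char) (res : List String),
    full = pre ++ temp ++ cs →
    ((PySem.List.enumerate (prefixBal (balOf temp) cs)
        (((pre.length + temp.length : Nat) : Int))).foldl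
      (stepB2 full) (res, ((pre.length : Nat) : Int))).1
    = (cs.foldl stepA (res, balOf temp, temp)).1 := by
  intro cs
  induction cs with
  | nil => intro full pre temp res _; simp [prefixBal]
  | cons c cs ih =>
    intro full pre temp res hfull
    simp only [prefixBal, PySem.List.enumerate_cons, List.foldl_cons, stepA, stepB2]
    have hdelta : (if c = 'L' then balOf temp + 1 else balOf temp - 1) = balOf temp + delta c := by
      simp only [delta]; split <;> ring
    rw [hdelta]
    by_cases h0 : balOf temp + delta c = 0
    · rw [if_pos h0, if_pos h0]
      have hslice : PySem.List.slice full (some ((pre.length : Nat) : Int))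
          (some (((pre.length + temp.length : Nat) : Int) + 1)) = temp ++ [c] := by
        have : (((pre.length + temp.length : Nat) : Int) + 1)
            = ((pre.length + temp.length + 1 : Nat) : Int) := by push_cast; ring
        rw [this, PySem.List.slice_natCast, hfull]
        have hdrop : ((pre ++ temp ++ c :: cs).drop pre.length) = temp ++ c :: cs := by
          rw [List.append_assoc, List.drop_left]
        rw [hdrop]
        have : pre.length + temp.length + 1 - pre.length = temp.length + 1 := by omega
        rw [this]
        rw [show temp ++ c :: cs = (temp ++ [c]) ++ cs by simp]
        rw [List.take_left' (by simp)]
      rw [hslice]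
      have h1 : (((pre.length + temp.length : Nat) : Int) + 1)
          = (((pre ++ temp ++ [c]).length + ([] : List Char).length : Nat) : Int) := by
        simp; push_cast; ring
      have h2 : (((pre.length + temp.length : Nat) : Int) + 1)
          = (((pre ++ temp ++ [c]).length : Nat) : Int) := by simp; push_cast; ring
      have hb : balOf ([] : List Char) = 0 := by simp [balOf]
      calc ((PySem.List.enumerate (prefixBal (balOf temp + delta c) cs)
              (((pre.length + temp.length : Nat) : Int) + 1)).foldl (stepB2 full)
            (res ++ [String.mk (temp ++ [c])], ((pre.length + temp.length : Nat) : Int) + 1)).1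
          = ((PySem.List.enumerate (prefixBal (balOf ([] : List Char)) cs)
              ((((pre ++ temp ++ [c]).length + ([] : List Char).length : Nat) : Int))).foldl
              (stepB2 full)
              (res ++ [String.mk (temp ++ [c])], (((pre ++ temp ++ [c]).length : Nat) : Int))).1 := by
            rw [← h1, ← h2, h0, hb]
        _ = (cs.foldl stepA (res ++ [String.mk (temp ++ [c])], balOf ([] : List Char), [])).1 := by
            apply ih
            rw [hfull]; simp
        _ = (cs.foldl stepA (res ++ [String.mk (temp ++ [c])], balOf temp + delta c, [])).1 := by
            rw [hb, h0]
    · rw [if_neg h0, if_neg h0]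
      have hb : balOf (temp ++ [c]) = balOf temp + delta c := by simp [balOf]
      have h1 : (((pre.length + temp.length : Nat) : Int) + 1)
          = ((pre.length + (temp ++ [c]).length : Nat) : Int) := by simp; push_cast; ring
      rw [h1, ← hb]
      apply ih
      rw [hfull]; simp

theorem MaxSplit_spec : Claim_equal_MaxSplit := by
  intro s _
  unfold Spec_MaxSplit MaxSplit MaxSplit_alt
  show (s.toList.foldl stepA ([], 0, [])).1
      = ((PySem.List.enumerate ((s.toList.foldl stepB1 ([], 0)).1)).foldl
          (stepB2 s.toList) ([], 0)).1
  rw [balFold s.toList [] 0, List.nil_append]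
  have := key s.toList s.toList [] [] [] (by simp)
  simp only [List.length_nil, Nat.add_zero, Nat.cast_zero] at this
  exact this.symm
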